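-- pv_equiv track=rewrite | github.com/SniperAsh6/advent-of-code | 2021/day-2.py | dive
-- ===== SOURCE A (Python) =====
-- def dive(input):
--     pos = 0
--     depth = 0
--     for x in input:
--         command, unit = x.split(" ")
--         if command == "forward":
--             pos += int(unit)
--         elif command == "down":
--             depth += int(unit)
--         elif command == "up":
--             depth -= int(unit)
--     return pos * depth
-- ===== SOURCE B (Python) =====
-- def dive(input):
--     parts = [x.split(" ") for x in input]
--     pairs = [(command, unit) for command, unit in parts]
--     pos = sum(int(unit) for command, unit in pairs if command == "forward")
--     down = sum(int(unit) for command, unit in pairs if command == "down")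
--     up = sum(int(unit) for command, unit in pairs if command == "up")
--     return pos * (down - up)
-- ===== Notes on version B (the rewrite author's own statement) =====
-- stated objective: alternative
-- what changed: Replaces A's single interleaved (pos, depth) accumulator loop with a parse-once pass followed by three independent filtered summations (forward, down, up) combined at the end.
import Mathlib
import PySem

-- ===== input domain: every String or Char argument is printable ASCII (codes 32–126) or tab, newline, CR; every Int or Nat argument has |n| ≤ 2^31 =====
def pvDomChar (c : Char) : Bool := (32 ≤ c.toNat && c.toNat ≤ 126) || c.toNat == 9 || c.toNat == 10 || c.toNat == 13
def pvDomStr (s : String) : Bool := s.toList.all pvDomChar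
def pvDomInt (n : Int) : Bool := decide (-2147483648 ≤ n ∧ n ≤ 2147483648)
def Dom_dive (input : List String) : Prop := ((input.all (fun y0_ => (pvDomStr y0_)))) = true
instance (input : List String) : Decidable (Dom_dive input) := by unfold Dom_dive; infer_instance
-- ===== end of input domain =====

-- B replaces A's single interleaved (pos, depth) accumulator loop with a parse-once pass
-- and three independent filtered summations (alternative decomposition, same cost).


-- ===== PORT A =====
-- x.split(" "): sep " " is nonempty, so PySem.Str.split? always returns some; .getD [] never fires.
def pvSplit (x : String) : List String := (PySem.Str.split? x " ").getD []

-- A: one fold carrying the (pos, depth) pair, branching per command.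
-- (match guard / .getD 0 only make the port total; Pre_dive excludes those inputs — Python raises there)
def dive (input : List String) : Int :=
  let st := input.foldl (fun (st : Int × Int) x =>
    match pvSplit x with
    | [command, unit] =>
      if command == "forward" then (st.1 + (PySem.Int.ofStr? unit).getD 0, st.2)
      else if command == "down" then (st.1, st.2 + (PySem.Int.ofStr? unit).getD 0)
      else if command == "up" then (st.1, st.2 - (PySem.Int.ofStr? unit).getD 0)
      else st
    | _ => st) (0, 0)
  st.1 * st.2

-- ===== PORT B =====
-- B-side helpers: unpack a split line into its (command, unit) pair (totalized with ("","")
-- where Python's unpacking raises ValueError; Pre_dive excludes those lines), int(unit)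
-- (totalized with 0; Pre_dive excludes the failing case), and a filtered sum.
def pvUnpack (p : List String) : String × String :=
  match p with
  | [] => ("", "")
  | [_] => ("", "")
  | command :: unit :: rest => if rest.isEmpty then (command, unit) else ("", "")

def pvVal (cu : String × String) : Int := (PySem.Int.ofStr? cu.2).getD 0

def pvSumFor (c : String) (pairs : List (String × String)) : Int :=
  ((pairs.filter (fun cu => cu.1 == c)).map pvVal).sum

def dive_alt (input : List String) : Int :=
  let parts := input.map (fun x => pvSplit x)
  let pairs := parts.map pvUnpack
  let pos := pvSumFor "forward" pairs
  let down := pvSumFor "down" pairs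
  let up := pvSumFor "up" pairs
  pos * (down - up)

-- ===== PRECONDITION & SPEC =====
-- Pre_dive: exactly the inputs where Python A returns normally — every line splits (on " ")
-- into exactly two tokens, and on the three recognised commands the unit parses as int
-- (otherwise Python raises ValueError).
def pvLineOK (x : String) : Bool :=
  match pvSplit x with
  | [] => false
  | [_] => false
  | command :: unit :: rest =>
      rest.isEmpty &&
        (if command == "forward" || command == "down" || command == "up"
         then (PySem.Int.ofStr? unit).isSome else true)

def Pre_dive (input : List String) : Prop := (input.all pvLineOK) = true
instance (input : List String) : Decidable (Pre_dive input) := by unfold Pre_dive; infer_instance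

def pvWitness_dive : List String := ["forward 5", "down 3", "up 1"]

def Spec_dive (input : List String) (out : Int) : Prop := out = dive_alt input
instance (input : List String) (out : Int) : Decidable (Spec_dive input out) := by unfold Spec_dive; infer_instance

-- ===== CLAIM (what is proved, stated in full; the proofs are below) =====
def Claim_equal_dive : Prop := ∀ (input : List String), Dom_dive input → Pre_dive input → Spec_dive input (dive input)

-- ===== LEMMAS AND PROOFS =====

-- proof helper: the parsed (command, unit) pair of one line
def pvPair (x : String) : String × String := pvUnpack (pvSplit x)

theorem pvSumFor_cons (c : String) (cu : String × String) (l : List (String × String)) :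
    pvSumFor c (cu :: l) = (if cu.1 == c then pvVal cu else 0) + pvSumFor c l := by
  simp only [pvSumFor, List.filter_cons]
  split_ifs <;> simp

theorem dive_fold (l : List String) (p d : Int) :
    l.foldl (fun (st : Int × Int) x =>
      match pvSplit x with
      | [command, unit] =>
        if command == "forward" then (st.1 + (PySem.Int.ofStr? unit).getD 0, st.2)
        else if command == "down" then (st.1, st.2 + (PySem.Int.ofStr? unit).getD 0)
        else if command == "up" then (st.1, st.2 - (PySem.Int.ofStr? unit).getD 0)
        else st
      | _ => st) (p, d)
    = (p + pvSumFor "forward" (l.map pvPair),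
       d + pvSumFor "down" (l.map pvPair) - pvSumFor "up" (l.map pvPair)) := by
  induction l generalizing p d with
  | nil => simp [pvSumFor]
  | cons x l ih =>
    simp only [List.foldl_cons, List.map_cons]
    rcases hs : pvSplit x with _ | ⟨c, _ | ⟨u, _ | ⟨z, t⟩⟩⟩ <;>
      simp only [hs, pvPair, pvUnpack, pvSumFor_cons, ih, pvVal] <;>
      [skip; skip; (by_cases h1 : c == "forward" <;> by_cases h2 : c == "down" <;>
        by_cases h3 : c == "up"); skip] <;>
      simp_all <;> ring

theorem dive_eq_alt (input : List String) : dive input = dive_alt input := by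
  simp only [dive, dive_alt, dive_fold]
  rw [List.map_map]
  have h : pvUnpack ∘ (fun x => pvSplit x) = pvPair := by
    funext x; simp [pvPair, Function.comp]
  rw [h]; ring

-- ===== VERDICT (by name: the statement is the Claim_ definition above) =====
theorem dive_spec : Claim_equal_dive := by
  intro input _ _
  exact dive_eq_alt input
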